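-- pv_equiv track=rewrite | github.com/loanel/mownit-4-simulated_annealing | mownit_lab4/zad2/energy_functions.py | energy_two_plus
-- ===== SOURCE A (Python) =====
-- def energy_two_plus(image, pixel, neighbors):
--     energy = 0
--     if pixel not in image:
--         return 0
--     for neighbor in image.intersection(neighbors):
--         if abs(pixel[0] - neighbor[0]) + abs(pixel[1] - neighbor[1]) == 1:
--             energy += -1
--         else:
--             energy += 1
--     return energy
-- ===== SOURCE B (Python) =====
-- def energy_two_plus(image, pixel, neighbors):
--     if pixel not in image:
--         return 0
--     common = image & neighbors
--     x, y = pixel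
--     adj = sum(1 for c in ((x + 1, y), (x - 1, y), (x, y + 1), (x, y - 1)) if c in common)
--     return len(common) - 2 * adj
-- ===== Notes on version B (the rewrite author's own statement) =====
-- stated objective: simpler
-- what changed: replaces the per-element Manhattan-distance loop over the intersection by the closed form len(common) - 2*adj, where adj is obtained by four membership tests on the orthogonally adjacent cells
import Mathlib
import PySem

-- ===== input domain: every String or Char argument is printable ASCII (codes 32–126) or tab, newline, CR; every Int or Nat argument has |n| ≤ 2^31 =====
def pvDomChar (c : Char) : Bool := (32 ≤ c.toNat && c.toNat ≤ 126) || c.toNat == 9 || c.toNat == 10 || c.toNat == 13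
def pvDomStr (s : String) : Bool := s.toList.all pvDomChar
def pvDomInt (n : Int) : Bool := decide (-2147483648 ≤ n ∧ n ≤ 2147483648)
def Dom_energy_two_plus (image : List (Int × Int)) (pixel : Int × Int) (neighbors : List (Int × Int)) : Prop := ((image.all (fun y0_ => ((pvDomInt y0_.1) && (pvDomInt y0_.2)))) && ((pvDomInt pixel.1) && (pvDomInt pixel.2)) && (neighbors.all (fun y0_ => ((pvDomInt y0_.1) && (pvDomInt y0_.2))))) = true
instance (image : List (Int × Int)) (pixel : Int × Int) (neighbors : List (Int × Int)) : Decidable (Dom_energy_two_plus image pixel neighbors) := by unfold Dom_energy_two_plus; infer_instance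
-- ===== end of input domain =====

-- B replaces A's per-element distance loop over the intersection by the closed form
-- len(common) - 2*adj with adj counted by four membership tests (objective: simpler).


-- ===== PORT A =====
def energy_two_plus (image : List (Int × Int)) (pixel : Int × Int) (neighbors : List (Int × Int)) : Int :=
  if pixel ∈ image then
    (PySem.Set.inter image neighbors).foldl
      (fun energy nb =>
        if (pixel.1 - nb.1).natAbs + (pixel.2 - nb.2).natAbs = 1 then energy + (-1) else energy + 1)
      0
  else 0

-- ===== PORT B =====
def energy_two_plus_alt (image : List (Int × Int)) (pixel : Int × Int) (neighbors : List (Int × Int)) : Int :=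
  if pixel ∈ image then
    let common := PySem.Set.inter image neighbors
    let x := pixel.1
    let y := pixel.2
    let adj := ([(x + 1, y), (x - 1, y), (x, y + 1), (x, y - 1)] : List (Int × Int)).countP
      (fun c => decide (c ∈ common))
    (common.length : Int) - 2 * (adj : Int)
  else 0

-- ===== PRECONDITION & SPEC =====
-- Pre_ states the Python set invariant: 'image' is a Python set, so its list model holds
-- distinct elements; a list with duplicates models no input A can actually receive.
def Pre_energy_two_plus (image : List (Int × Int)) (pixel : Int × Int) (neighbors : List (Int × Int)) : Prop := image.Nodup
instance (image : List (Int × Int)) (pixel : Int × Int) (neighbors : List (Int × Int)) : Decidable (Pre_energy_two_plus image pixel neighbors) := by unfold Pre_energy_two_plus; infer_instance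
def pvWitness_energy_two_plus : (List (Int × Int)) × (Int × Int) × (List (Int × Int)) :=
  ([(0, 0), (1, 0), (2, 2)], (0, 0), [(1, 0), (2, 2)])
def Spec_energy_two_plus (image : List (Int × Int)) (pixel : Int × Int) (neighbors : List (Int × Int)) (out : Int) : Prop := out = energy_two_plus_alt image pixel neighbors
instance (image : List (Int × Int)) (pixel : Int × Int) (neighbors : List (Int × Int)) (out : Int) : Decidable (Spec_energy_two_plus image pixel neighbors out) := by unfold Spec_energy_two_plus; infer_instance

-- ===== CLAIM (what is proved, stated in full; the proofs are below) =====
def Claim_equal_energy_two_plus : Prop := ∀ (image : List (Int × Int)) (pixel : Int × Int) (neighbors : List (Int × Int)), Dom_energy_two_plus image pixel neighbors → Pre_energy_two_plus image pixel neighbors → Spec_energy_two_plus image pixel neighbors (energy_two_plus image pixel neighbors)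

-- ===== LEMMAS AND PROOFS =====

-- A's ±1 accumulation equals length - 2 * (number of elements satisfying the test).
theorem pv_foldl_pm1 (l : List (Int × Int)) (p : (Int × Int) → Prop) [DecidablePred p] (e : Int) :
    l.foldl (fun energy nb => if p nb then energy + (-1) else energy + 1) e
      = e + (l.length : Int) - 2 * (l.countP (fun a => decide (p a)) : Int) := by
  induction l generalizing e with
  | nil => simp
  | cons hd tl ih =>
    by_cases h : p hd <;> simp [h, ih] <;> ring

-- Manhattan distance 1 from pixel (x, y) means membership in the four adjacent cells.
theorem pv_dist_one_iff (x y : Int) (nb : Int × Int) :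
    ((x - nb.1).natAbs + (y - nb.2).natAbs = 1)
      ↔ nb ∈ ([(x + 1, y), (x - 1, y), (x, y + 1), (x, y - 1)] : List (Int × Int)) := by
  obtain ⟨a, b⟩ := nb
  simp [Prod.ext_iff]
  omega

-- Counting elements of s lying in t equals counting elements of t lying in s (both Nodup).
theorem pv_countP_mem_comm (s t : List (Int × Int)) (hs : s.Nodup) (ht : t.Nodup) :
    s.countP (fun a => decide (a ∈ t)) = t.countP (fun a => decide (a ∈ s)) := by
  have key : ∀ u v : List (Int × Int), u.Nodup → v.Nodup →
      u.countP (fun a => decide (a ∈ v)) = (u.toFinset ∩ v.toFinset).card := by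
    intro u v hu hv
    rw [List.countP_eq_length_filter]
    have hnd : (u.filter (fun a => decide (a ∈ v))).Nodup := hu.filter _
    rw [← List.toFinset_card_of_nodup hnd, List.toFinset_filter]
    congr 1
    ext a
    simp
  rw [key s t hs ht, key t s ht hs, Finset.inter_comm]

-- The four adjacent cells are pairwise distinct.
theorem pv_adj_nodup (x y : Int) :
    ([(x + 1, y), (x - 1, y), (x, y + 1), (x, y - 1)] : List (Int × Int)).Nodup := by
  simp [Prod.ext_iff]
  omega

-- ===== VERDICT (by name: the statement is the Claim_ definition above) =====
theorem energy_two_plus_spec : Claim_equal_energy_two_plus := by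
  intro image pixel neighbors _ hpre
  unfold Spec_energy_two_plus energy_two_plus energy_two_plus_alt
  by_cases hmem : pixel ∈ image
  · simp only [hmem, if_pos]
    rw [pv_foldl_pm1 (PySem.Set.inter image neighbors)
        (fun nb => (pixel.1 - nb.1).natAbs + (pixel.2 - nb.2).natAbs = 1) 0]
    have hnd : (PySem.Set.inter image neighbors).Nodup := PySem.Set.nodup_inter image neighbors (show image.Nodup from hpre)
    have hcong : (PySem.Set.inter image neighbors).countP
        (fun a => decide ((pixel.1 - a.1).natAbs + (pixel.2 - a.2).natAbs = 1))
        = (PySem.Set.inter image neighbors).countP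
          (fun a => decide (a ∈ ([(pixel.1 + 1, pixel.2), (pixel.1 - 1, pixel.2),
              (pixel.1, pixel.2 + 1), (pixel.1, pixel.2 - 1)] : List (Int × Int)))) := by
      apply List.countP_congr
      intro a _
      simp [pv_dist_one_iff pixel.1 pixel.2 a]
    rw [hcong, pv_countP_mem_comm _ _ hnd (pv_adj_nodup pixel.1 pixel.2)]
    ring
  · simp [hmem]
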